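-- pv_equiv track=rewrite | github.com/NoahNevens/gopher-world-source | mutational_neighborhood/mutatedTraps.py | convertCohLetArrToStat
-- ===== SOURCE A (Python) =====
-- from collections import Counter
--
-- def convertCohLetArrToStat(lethalityArr, coherenceArr):
--     arrTuples = []
--     for lethal, coherence in zip(lethalityArr, coherenceArr):
--         arrTuples.append((lethal, coherence))
--     distinctTuples = Counter(arrTuples)
--
--     newCoherence = []
--     newLethality = []
--     size = []
--     for (key0,key1),val in list(distinctTuples.items()):
--         newCoherence.append(key0)
--         newLethality.append(key1)
--         size.append(val)
--
--     return newCoherence, newLethality, size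
-- ===== SOURCE B (Python) =====
-- def convertCohLetArrToStat(lethalityArr, coherenceArr):
--     pairs = [(l, c) for l, c in zip(lethalityArr, coherenceArr)]
--     newCoherence = []
--     newLethality = []
--     size = []
--     while pairs:
--         head = pairs[0]
--         newCoherence.append(head[0])
--         newLethality.append(head[1])
--         size.append(pairs.count(head))
--         pairs = [p for p in pairs if p != head]
--     return newCoherence, newLethality, size
-- ===== Notes on version B (the rewrite author's own statement) =====
-- stated objective: alternative
-- what changed: Replaces A's hash-based counting (Counter over the zipped pair list, then an unzip pass over its items) with a comparison-only dedupe-by-filtering loop: repeatedly take the first remaining pair, emit it with its count via list.count, and filter all of its occurrences out of the worklist; no Counter, dict or hashing is used.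
import Mathlib
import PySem

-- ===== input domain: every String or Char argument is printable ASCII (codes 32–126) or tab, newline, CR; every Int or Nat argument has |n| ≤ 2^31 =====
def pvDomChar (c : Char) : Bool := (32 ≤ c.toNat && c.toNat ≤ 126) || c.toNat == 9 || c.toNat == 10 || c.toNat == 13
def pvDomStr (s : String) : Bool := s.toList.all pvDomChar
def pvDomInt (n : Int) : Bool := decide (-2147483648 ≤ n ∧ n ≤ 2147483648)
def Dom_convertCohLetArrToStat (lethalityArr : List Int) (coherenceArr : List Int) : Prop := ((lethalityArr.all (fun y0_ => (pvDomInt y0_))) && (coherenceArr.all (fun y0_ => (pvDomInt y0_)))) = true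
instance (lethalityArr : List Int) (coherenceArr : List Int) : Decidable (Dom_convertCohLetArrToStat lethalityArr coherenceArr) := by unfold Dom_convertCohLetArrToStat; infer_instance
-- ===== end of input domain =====

-- B replaces A's hash-based counting (Counter then unzip) by a comparison-only
-- dedupe-by-filtering loop: emit the first remaining pair with its count, then filter
-- its occurrences out of the worklist (objective: alternative algorithm, no hashing).

-- ===== PORT A =====
def convertCohLetArrToStat (lethalityArr : List Int) (coherenceArr : List Int) : List Int × List Int × List Int :=
  let arrTuples := (lethalityArr.zip coherenceArr).foldl (fun acc p => acc ++ [p]) []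
  let distinctTuples := PySem.Dict.counter arrTuples
  let r := distinctTuples.items.foldl
    (fun (acc : List Int × List Int × List Int) kv =>
      (acc.1 ++ [kv.1.1], acc.2.1 ++ [kv.1.2], acc.2.2 ++ [kv.2]))
    ([], [], [])
  (r.1, r.2.1, r.2.2)

-- ===== PORT B =====
-- Source B's while-loop: each iteration emits the head pair with its count and filters it out;
-- rendered as the structural recursion on the shrinking worklist.
def pvLoopB : List (Int × Int) → List Int × List Int × List Int
  | [] => ([], [], [])
  | h :: t =>
    let rest := pvLoopB (t.filter (fun p => p != h))
    (h.1 :: rest.1, h.2 :: rest.2.1, ((h :: t).count h : Int) :: rest.2.2)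
termination_by ps => ps.length
decreasing_by
  simp only [List.length_unattach, List.length_cons]
  exact Nat.lt_succ_of_le (le_trans (List.length_filter_le _ _) (by simp))

def convertCohLetArrToStat_alt (lethalityArr : List Int) (coherenceArr : List Int) : List Int × List Int × List Int :=
  pvLoopB ((lethalityArr.zip coherenceArr).map (fun p => p))

-- ===== PRECONDITION & SPEC =====
def Spec_convertCohLetArrToStat (lethalityArr : List Int) (coherenceArr : List Int) (out : List Int × List Int × List Int) : Prop := out = convertCohLetArrToStat_alt lethalityArr coherenceArr
instance (lethalityArr : List Int) (coherenceArr : List Int) (out : List Int × List Int × List Int) : Decidable (Spec_convertCohLetArrToStat lethalityArr coherenceArr out) := by unfold Spec_convertCohLetArrToStat; infer_instance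

-- ===== CLAIM (what is proved, stated in full; the proofs are below) =====
def Claim_equal_convertCohLetArrToStat : Prop := ∀ (lethalityArr : List Int) (coherenceArr : List Int), Dom_convertCohLetArrToStat lethalityArr coherenceArr → Spec_convertCohLetArrToStat lethalityArr coherenceArr (convertCohLetArrToStat lethalityArr coherenceArr)

-- ===== LEMMAS AND PROOFS =====

-- A's unzip loop over any item list is three maps
theorem pv_foldA_triple (l : List ((Int × Int) × Int)) (a b c : List Int) :
    l.foldl (fun (acc : List Int × List Int × List Int) kv =>
        (acc.1 ++ [kv.1.1], acc.2.1 ++ [kv.1.2], acc.2.2 ++ [kv.2])) (a, b, c)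
      = (a ++ l.map (fun kv => kv.1.1), b ++ l.map (fun kv => kv.1.2), c ++ l.map (fun kv => kv.2)) := by
  induction l generalizing a b c with
  | nil => simp
  | cons kv t ih => simp [List.foldl_cons, ih, List.append_assoc]

-- folding Set.add skips every element already present in the accumulator
theorem pv_foldl_add_filter (t : List (Int × Int)) (s : PySem.Set (Int × Int)) (x : Int × Int)
    (hx : x ∈ s) :
    t.foldl PySem.Set.add s = (t.filter (fun p => p != x)).foldl PySem.Set.add s := by
  induction t generalizing s with
  | nil => rfl
  | cons a t ih =>
    by_cases ha : a = x
    · subst ha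
      have : PySem.Set.add s a = s := by
        simp [PySem.Set.add, PySem.Set.contains, hx]
      simp [this, ih s hx]
    · simp only [List.filter_cons, bne_iff_ne, ne_eq, ha, not_false_eq_true,
        if_true, List.foldl_cons]
      exact ih _ ((PySem.Set.mem_add _ _ _).mpr (Or.inl hx))

-- folding Set.add over a list avoiding a commutes with a leading a in the accumulator
theorem pv_foldl_add_cons (t : List (Int × Int)) (s : PySem.Set (Int × Int)) (a : Int × Int)
    (ha : ∀ y ∈ t, y ≠ a) :
    t.foldl PySem.Set.add (a :: s) = a :: t.foldl PySem.Set.add s := by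
  induction t generalizing s with
  | nil => rfl
  | cons b t ih =>
    have hb : b ≠ a := ha b (by simp)
    have : PySem.Set.add (a :: s) b = a :: PySem.Set.add s b := by
      simp [PySem.Set.add, PySem.Set.contains, hb]
      split <;> rfl
    rw [List.foldl_cons, this, List.foldl_cons]
    exact ih _ (fun y hy => ha y (by simp [hy]))

-- the first-occurrence set of h :: t is h followed by the set of t with h filtered out
theorem pv_ofList_cons (h : Int × Int) (t : List (Int × Int)) :
    PySem.Set.ofList (h :: t) = h :: PySem.Set.ofList (t.filter (fun p => p != h)) := by
  have h1 : PySem.Set.ofList (h :: t) = t.foldl PySem.Set.add [h] := by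
    rw [PySem.Set.ofList_eq_foldl]; rfl
  rw [h1, pv_foldl_add_filter t [h] h (by simp)]
  rw [pv_foldl_add_cons _ _ _ (fun y hy => by
    have := List.of_mem_filter hy; simpa [bne_iff_ne] using this)]
  rw [PySem.Set.ofList_eq_foldl]

-- B's loop computes exactly the three columns of (first-occurrence key, count)
theorem pv_loopB_eq (ps : List (Int × Int)) :
    pvLoopB ps = ((PySem.Set.ofList ps).map Prod.fst, (PySem.Set.ofList ps).map Prod.snd,
                  (PySem.Set.ofList ps).map (fun k => (ps.count k : Int))) := by
  induction ps using pvLoopB.induct with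
  | case1 => simp [pvLoopB, PySem.Set.ofList]
  | case2 h t ih =>
    rw [List.unattach_filter (g := fun p => p != h) (hf := fun _ _ => rfl), List.unattach_attach] at ih
    rw [pvLoopB, ih, pv_ofList_cons]
    simp only [List.map_cons]
    refine congrArg _ (congrArg _ ?_)
    congr 1
    apply List.map_congr_left
    intro k hk
    have hkf : k ∈ t.filter (fun p => p != h) := by
      have := PySem.Set.mem_ofList _ k |>.mp hk
      exact this
    have hkh : k ≠ h := by simpa [bne_iff_ne] using List.of_mem_filter hkf
    have hcf : (t.filter (fun p => p != h)).count k = t.count k := by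
      rw [List.count_filter (by simp [bne_iff_ne, hkh])]
    rw [hcf]
    simp [Ne.symm hkh]

-- ===== VERDICT (by name: the statement is the Claim_ definition above) =====
theorem convertCohLetArrToStat_spec : Claim_equal_convertCohLetArrToStat := by
  intro l c _
  unfold Spec_convertCohLetArrToStat convertCohLetArrToStat convertCohLetArrToStat_alt
  simp only [PySem.List.foldl_append_singleton, List.nil_append, PySem.Dict.items_counter,
    pv_foldA_triple, List.map_map, List.map_id', pv_loopB_eq]
  rfl
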